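-- pv_equiv track=rewrite | github.com/wismerite/set-and-memo | src/set_or_memo/find_longest_word.py | has_repeating_characters
-- ===== SOURCE A (Python) =====
-- def has_repeating_characters(word: str) -> bool:
--     word = sorted(word)
--     memo = {word.pop(): 1}
--     for i in range(1, len(word)):
--         char = word.pop()
--         if char in memo:
--             return True
--         else:
--             memo[char] = 1
--     return False
-- ===== SOURCE B (Python) =====
-- def has_repeating_characters(word: str) -> bool:
--     return len(set(word)) != len(word)
-- ===== Notes on version B (the rewrite author's own statement) =====
-- stated objective: simpler
-- what changed: Replaces the sort + destructive pop()-loop with a memo dict by a one-line cardinality comparison len(set(word)) != len(word), dropping the O(n log n) sort for a single O(n) set build.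
-- intended difference: On words whose smallest character occurs exactly twice and every other character is unique (e.g. 'aa', 'aab'), A returns False because its loop never examines the smallest sorted character, while B returns True, the intended answer since the word does contain a repeated character. — e.g. on has_repeating_characters("aa"): A returns false, B returns true
import Mathlib
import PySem

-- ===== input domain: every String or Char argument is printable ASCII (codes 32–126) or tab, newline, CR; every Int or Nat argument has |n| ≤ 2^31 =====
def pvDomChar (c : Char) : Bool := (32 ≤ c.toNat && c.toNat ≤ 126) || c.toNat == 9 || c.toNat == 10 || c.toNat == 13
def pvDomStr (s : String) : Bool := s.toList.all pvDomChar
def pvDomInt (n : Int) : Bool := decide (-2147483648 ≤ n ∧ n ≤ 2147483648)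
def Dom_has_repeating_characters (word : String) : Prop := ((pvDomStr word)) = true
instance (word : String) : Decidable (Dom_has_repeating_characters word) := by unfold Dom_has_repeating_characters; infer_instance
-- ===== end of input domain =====

-- B replaces A's sort + destructive pop()-loop with a memo dict by the one-line cardinality
-- comparison len(set(word)) != len(word) (simpler); where A's loop misses the repeat of the
-- smallest character, B returns the intended True (see D_ below).

-- ===== PORT A =====
-- the for-loop over range(1, len(word)): each iteration pops the last element
def pvLoopA : List Int → List Char → PySem.Dict Char Int → Bool
  | [], _, _ => false
  | _ :: is, w, memo =>
    match PySem.List.pop? w with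
    | none => false  -- IndexError; unreachable: the range is shorter than the list
    | some (c, w') =>
      if memo.contains c then true
      else pvLoopA is w' (memo.insert c 1)

def has_repeating_characters (word : String) : Bool :=
  -- word = sorted(word); then word.pop()
  match PySem.List.pop? (PySem.List.sorted word.toList (fun c => c)) with
  | none => false                   -- IndexError on the empty word; excluded by Pre_
  | some (c, w') =>
    pvLoopA (PySem.List.pyRange 1 (w'.length : Int)) w' (PySem.Dict.empty.insert c 1)

-- ===== PORT B =====
def has_repeating_characters_alt (word : String) : Bool :=
  PySem.Set.len (PySem.Set.ofList word.toList) != PySem.Str.len word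

-- ===== PRECONDITION & SPEC =====
-- Pre_ excludes only the empty string, on which A raises IndexError (word.pop() on an empty list).
def Pre_has_repeating_characters (word : String) : Prop := word ≠ ""
instance (word : String) : Decidable (Pre_has_repeating_characters word) := by unfold Pre_has_repeating_characters; infer_instance
def pvWitness_has_repeating_characters : String := "ab"

-- On words whose smallest character occurs exactly twice and every other character is unique
-- (e.g. "aa", "aab"), A returns False because its loop never examines the smallest sorted
-- character, while B returns True — the intended answer, since the word does repeat a character.
def D_has_repeating_characters (word : String) : Prop :=
  word ≠ "" ∧
  word.toList.count (word.toList.foldl min (word.toList.headD 'a')) = 2 ∧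
  word.toList.length = (PySem.Set.ofList word.toList).length + 1
instance (word : String) : Decidable (D_has_repeating_characters word) := by unfold D_has_repeating_characters; infer_instance

def Spec_has_repeating_characters (word : String) (out : Bool) : Prop := ¬ D_has_repeating_characters word → out = has_repeating_characters_alt word
instance (word : String) (out : Bool) : Decidable (Spec_has_repeating_characters word out) := by unfold Spec_has_repeating_characters; infer_instance

def pvDiffWitness_has_repeating_characters : String := "aa"
def pvDiffWitnessOut_has_repeating_characters : Bool × Bool := (false, true)

-- ===== CLAIM (what is proved, stated in full; the proofs are below) =====
def Claim_unchanged_has_repeating_characters : Prop := ∀ (word : String), Dom_has_repeating_characters word → Pre_has_repeating_characters word → Spec_has_repeating_characters word (has_repeating_characters word)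
def Claim_changed_has_repeating_characters : Prop := Dom_has_repeating_characters (pvDiffWitness_has_repeating_characters) ∧ Pre_has_repeating_characters (pvDiffWitness_has_repeating_characters) ∧ D_has_repeating_characters (pvDiffWitness_has_repeating_characters) ∧ has_repeating_characters (pvDiffWitness_has_repeating_characters) = pvDiffWitnessOut_has_repeating_characters.1 ∧ has_repeating_characters_alt (pvDiffWitness_has_repeating_characters) = pvDiffWitnessOut_has_repeating_characters.2 ∧ pvDiffWitnessOut_has_repeating_characters.1 ≠ pvDiffWitnessOut_has_repeating_characters.2
def Claim_exact_has_repeating_characters : Prop := ∀ (word : String), Dom_has_repeating_characters word → Pre_has_repeating_characters word → D_has_repeating_characters word → has_repeating_characters word ≠ has_repeating_characters_alt word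

-- ===== LEMMAS AND PROOFS =====

-- set(l) keeps first occurrences in order, hence is a sublist of l
lemma pvOfList_sublist (l : List Char) : (PySem.Set.ofList l).Sublist l := by
  induction l using List.reverseRecOn with
  | nil => simp [PySem.Set.ofList_nil]
  | append_singleton xs x ih =>
      rw [PySem.Set.ofList_append_singleton, PySem.Set.add_eq_ite]
      split_ifs with hx
      · exact ih.trans (List.sublist_append_left xs [x])
      · exact List.Sublist.append ih (List.Sublist.refl [x])

-- B computes "l has a duplicate"
lemma pvAlt_eq (word : String) :
    has_repeating_characters_alt word = !decide (word.toList.Nodup) := by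
  unfold has_repeating_characters_alt
  by_cases h : word.toList.Nodup
  · rw [PySem.Set.ofList_eq_self_of_nodup _ h]
    simp [PySem.Set.len, PySem.Str.len_eq, h]
  · have hne : (PySem.Set.ofList word.toList).length ≠ word.toList.length := by
      intro he
      exact h ((pvOfList_sublist word.toList).eq_of_length he ▸ PySem.Set.nodup_ofList _)
    simp [PySem.Set.len, PySem.Str.len_eq, h, bne_iff_ne]
    exact_mod_cast hne

lemma pvLen_pyRange (n : Nat) : ∀ (a b : Int), (b - a).toNat = n →
    (PySem.List.pyRange a b).length = n := by
  induction n with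
  | zero =>
      intro a b h
      have hba : b ≤ a := by omega
      have : PySem.List.pyRange a b = [] := by simp [PySem.List.pyRange]; omega
      simp [this]
  | succ k ih =>
      intro a b h
      have hab : a < b := by omega
      rw [PySem.List.pyRange_one_cons hab]
      simp [ih (a + 1) b (by omega)]

-- the pop()-loop returns True iff the processed suffix repeats or hits the memo
lemma pvLoopA_iff : ∀ (is : List Int) (w : List Char) (memo : PySem.Dict Char Int),
    is.length ≤ w.length →
    (pvLoopA is w memo = true ↔
      ¬ (w.reverse.take is.length).Nodup ∨ ∃ c ∈ w.reverse.take is.length, memo.contains c = true) := by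
  intro is
  induction is with
  | nil => intro w memo _; simp [pvLoopA]
  | cons i is ih =>
    intro w memo hlen
    rcases List.eq_nil_or_concat w with rfl | ⟨ys, x, rfl⟩
    · simp at hlen
    · rw [List.concat_eq_append] at *
      have hstep : pvLoopA (i :: is) (ys ++ [x]) memo =
          (if memo.contains x then true else pvLoopA is ys (memo.insert x 1)) := by
        simp [pvLoopA, PySem.List.pop?_last]
      rw [hstep]
      have hlen' : is.length ≤ ys.length := by simp at hlen; omega
      have hrev : (ys ++ [x]).reverse = x :: ys.reverse := by simp
      rw [hrev]
      simp only [List.length_cons, List.take_succ_cons]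
      by_cases hx : memo.contains x = true
      · simp only [hx, if_true, true_iff]
        exact Or.inr ⟨x, by simp, hx⟩
      · rw [if_neg hx, ih ys (memo.insert x 1) hlen']
        have hci : ∀ c, (memo.insert x 1).contains c = (c == x || memo.contains c) :=
          fun c => PySem.Dict.contains_insert memo x c 1
        have hx' : memo.contains x = false := by simpa using hx
        simp only [hci, Bool.or_eq_true, beq_iff_eq, List.nodup_cons, List.mem_cons]
        constructor
        · rintro (h | ⟨c, hc, (rfl | h)⟩)
          · tauto
          · exact Or.inl (fun hnd => hnd.1 hc)
          · exact Or.inr ⟨c, Or.inr hc, h⟩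
        · rintro (h | ⟨c, (rfl | hc), h⟩)
          · by_cases hm : x ∈ ys.reverse.take is.length
            · exact Or.inr ⟨x, hm, Or.inl rfl⟩
            · exact Or.inl (fun hnd => h ⟨hm, hnd⟩)
          · rw [hx'] at h; simp at h
          · exact Or.inr ⟨c, hc, Or.inr h⟩

lemma pvNodup_concat (l : List Char) (x : Char) : (l ++ [x]).Nodup ↔ l.Nodup ∧ x ∉ l := by
  rw [List.nodup_append_comm]
  simp only [List.singleton_append, List.nodup_cons]
  exact and_comm

-- A computes "sorted(l)[1:] has a duplicate"
lemma pvA_char (word : String) (h : word.toList ≠ []) :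
    has_repeating_characters word =
      !decide (((PySem.List.sorted word.toList (fun c => c)).drop 1).Nodup) := by
  rcases List.eq_nil_or_concat (PySem.List.sorted word.toList (fun c => c)) with hnil | ⟨ys, x, hconcat⟩
  · exact absurd ((PySem.List.sorted_eq_nil_iff _ _ _).mp hnil) h
  · rw [List.concat_eq_append] at hconcat
    unfold has_repeating_characters
    rw [hconcat, PySem.List.pop?_last]
    show pvLoopA (PySem.List.pyRange 1 (ys.length : Int)) ys (PySem.Dict.empty.insert x (1 : Int)) =
      !decide (((ys ++ [x]).drop 1).Nodup)
    rcases List.eq_nil_or_concat ys with rfl | ⟨zs, y, hys⟩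
    · -- one-character word: empty range, no repeat
      have h0 : PySem.List.pyRange 1 ((List.length ([] : List Char) : Int)) = [] := by decide
      rw [h0]
      simp [pvLoopA]
    · have hys1 : 1 ≤ ys.length := by rw [hys]; simp
      have hlr : (PySem.List.pyRange 1 (ys.length : Int)).length = ys.length - 1 :=
        pvLen_pyRange (ys.length - 1) 1 (ys.length : Int) (by omega)
      have hloop := pvLoopA_iff (PySem.List.pyRange 1 (ys.length : Int)) ys
        (PySem.Dict.empty.insert x 1) (by rw [hlr]; omega)
      rw [hlr] at hloop
      have htake : ys.reverse.take (ys.length - 1) = (ys.drop 1).reverse := by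
        rw [List.take_reverse, show ys.length - (ys.length - 1) = 1 by omega]
      rw [htake] at hloop
      have hcx : ∀ c, ((PySem.Dict.empty.insert x (1 : Int)).contains c) = (c == x) := by
        intro c
        rw [PySem.Dict.contains_insert, PySem.Dict.contains_empty]
        simp
      have hdrop : (ys ++ [x]).drop 1 = ys.drop 1 ++ [x] :=
        List.drop_append_of_le_length hys1
      have hiff : pvLoopA (PySem.List.pyRange 1 (ys.length : Int)) ys
          (PySem.Dict.empty.insert x 1) = true ↔ ¬ ((ys ++ [x]).drop 1).Nodup := by
        rw [hloop, hdrop, pvNodup_concat]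
        simp only [hcx, beq_iff_eq, List.nodup_reverse, List.mem_reverse]
        constructor
        · rintro (h | ⟨c, hc, hceq⟩) hk
          · exact h hk.1
          · exact hk.2 (hceq ▸ hc)
        · intro hnd
          by_cases hmem : x ∈ ys.drop 1
          · exact Or.inr ⟨x, hmem, rfl⟩
          · exact Or.inl fun hnd1 => hnd ⟨hnd1, hmem⟩
      cases hA : pvLoopA (PySem.List.pyRange 1 (ys.length : Int)) ys (PySem.Dict.empty.insert x 1) with
      | true =>
          rw [decide_eq_false (hiff.mp hA)]
          rfl
      | false =>
          have hnd : ((ys ++ [x]).drop 1).Nodup := by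
            by_contra hc
            rw [← hiff] at hc
            exact absurd hc (by simp [hA])
          rw [decide_eq_true hnd]
          rfl

-- set(s) and set(u) have the same size when s and u have the same members
lemma pvOfList_length_mem_iff (s u : List Char) (h : ∀ x, x ∈ s ↔ x ∈ u) :
    (PySem.Set.ofList s).length = (PySem.Set.ofList u).length :=
  ((List.perm_ext_iff_of_nodup (PySem.Set.nodup_ofList s) (PySem.Set.nodup_ofList u)).mpr
    (fun x => by rw [PySem.Set.mem_ofList, PySem.Set.mem_ofList]; exact h x)).length_eq

-- the running minimum of a nonempty list is the head of its sorted rearrangement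
lemma pvMin_eq (word : String) (a0 : Char) (t : List Char)
    (hw : PySem.List.sorted word.toList (fun c => c) = a0 :: t) :
    word.toList.foldl min (word.toList.headD 'a') = a0 := by
  have hperm := PySem.List.sorted_perm word.toList (fun c => c) false
  rw [hw] at hperm
  have hpair := PySem.List.sorted_pairwise word.toList (fun c => c)
  rw [hw, List.pairwise_cons] at hpair
  have hmin : ∀ y ∈ word.toList, a0 ≤ y := by
    intro y hy
    rcases List.mem_cons.mp (hperm.mem_iff.mpr hy) with hq | hq
    · rw [hq]
    · exact hpair.1 y hq
  cases hx : word.toList with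
  | nil => rw [hx] at hperm; exact absurd hperm.symm.length_eq (by simp)
  | cons x r =>
    rw [← hx]
    have hxl : x ∈ word.toList := by rw [hx]; exact List.mem_cons_self
    have hhead : word.toList.headD 'a' = x := by rw [hx]; rfl
    have hMl : word.toList.foldl min (word.toList.headD 'a') ∈ word.toList := by
      rcases PySem.List.foldl_min_mem word.toList (word.toList.headD 'a') with hq | hq
      · rw [hq, hhead]; exact hxl
      · exact hq
    have h1 : a0 ≤ word.toList.foldl min (word.toList.headD 'a') := hmin _ hMl
    have h2 : word.toList.foldl min (word.toList.headD 'a') ≤ a0 :=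
      (PySem.List.foldl_min_le word.toList (word.toList.headD 'a')).2 a0
        (hperm.mem_iff.mp List.mem_cons_self)
    exact le_antisymm h2 h1

lemma pvToList_ne (word : String) (h : word ≠ "") : word.toList ≠ [] := by
  intro he
  exact h (String.toList_eq_nil_iff.mp he)

-- ===== VERDICT (by name: the statement is the Claim_ definition above) =====
theorem has_repeating_characters_spec : Claim_unchanged_has_repeating_characters := by
  intro word _ hpre hnd
  have hl : word.toList ≠ [] := pvToList_ne word hpre
  rw [pvA_char word hl, pvAlt_eq]
  have hperm := PySem.List.sorted_perm word.toList (fun c => c) false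
  rcases hw : PySem.List.sorted word.toList (fun c => c) with - | ⟨a, t⟩
  · exact absurd ((PySem.List.sorted_eq_nil_iff _ _ _).mp hw) hl
  · rw [hw] at hperm
    simp only [List.drop_succ_cons, List.drop_zero]
    have hiff : t.Nodup ↔ word.toList.Nodup := by
      rw [← hperm.nodup_iff]
      constructor
      · intro hndt
        rw [List.nodup_cons]
        refine ⟨?_, hndt⟩
        intro hat
        -- a ∈ t and t.Nodup: this is exactly the D_ situation — contradiction with hnd
        apply hnd
        have hmem_w : ∀ c, c ∈ word.toList ↔ c ∈ a :: t := fun c => (hperm.mem_iff).symm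
        refine ⟨hpre, ?_, ?_⟩
        · rw [pvMin_eq word a t hw, ← hperm.count_eq a, List.count_cons_self]
          have h1 : t.count a ≤ 1 := List.nodup_iff_count_le_one.mp hndt a
          have h2 : 1 ≤ t.count a := List.one_le_count_iff.mpr hat
          omega
        · have h1 : (PySem.Set.ofList word.toList).length = (PySem.Set.ofList t).length := by
            refine pvOfList_length_mem_iff _ _ (fun x => ?_)
            rw [hmem_w x, List.mem_cons]
            constructor
            · rintro (hq | hq)
              · rw [hq]; exact hat
              · exact hq
            · exact Or.inr
          have h2 : PySem.Set.ofList t = t := PySem.Set.ofList_eq_self_of_nodup t hndt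
          have h3 : word.toList.length = t.length + 1 := by
            rw [← hperm.length_eq]; simp
          rw [h1, h2, h3]
      · intro hnd'
        exact (List.nodup_cons.mp hnd').2
    rw [decide_eq_decide.mpr hiff]

theorem has_repeating_characters_changed : Claim_changed_has_repeating_characters := by
  unfold Claim_changed_has_repeating_characters
  exact ⟨by decide, by decide, by decide, by decide, by decide, by decide⟩

theorem has_repeating_characters_tight : Claim_exact_has_repeating_characters := by
  intro word _ hpre hD
  obtain ⟨-, hct2, hlen⟩ := hD
  have hl : word.toList ≠ [] := pvToList_ne word hpre
  rw [pvA_char word hl, pvAlt_eq]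
  have hperm := PySem.List.sorted_perm word.toList (fun c => c) false
  rcases hw : PySem.List.sorted word.toList (fun c => c) with - | ⟨a, t⟩
  · exact absurd ((PySem.List.sorted_eq_nil_iff _ _ _).mp hw) hl
  · rw [hw] at hperm
    simp only [List.drop_succ_cons, List.drop_zero]
    rw [pvMin_eq word a t hw] at hct2
    have hmem_w : ∀ c, c ∈ word.toList ↔ c ∈ a :: t := fun c => (hperm.mem_iff).symm
    have hta : t.count a = 1 := by
      have := hperm.count_eq a
      rw [List.count_cons_self] at this
      omega
    have hat : a ∈ t := List.one_le_count_iff.mp (by omega)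
    have hndt : t.Nodup := by
      have h1 : (PySem.Set.ofList word.toList).length = (PySem.Set.ofList t).length := by
        refine pvOfList_length_mem_iff _ _ (fun x => ?_)
        rw [hmem_w x, List.mem_cons]
        constructor
        · rintro (hq | hq)
          · rw [hq]; exact hat
          · exact hq
        · exact Or.inr
      have h3 : word.toList.length = t.length + 1 := by
        rw [← hperm.length_eq]; simp
      have h4 : (PySem.Set.ofList t).length = t.length := by omega
      rw [← (pvOfList_sublist t).eq_of_length h4]
      exact PySem.Set.nodup_ofList t
    have hBnotnodup : ¬ word.toList.Nodup := by
      intro hnd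
      have := List.nodup_iff_count_le_one.mp hnd a
      omega
    simp [hndt, hBnotnodup]
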